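-- pv_equiv track=rewrite | github.com/YounghwanShin/SubQueryRAG | src/keywordAlgorithm.py | partition_phrases
-- ===== SOURCE A (Python) =====
-- def partition_phrases(lemmatized_text_with_pos, stopwords):
--     phrases = []
--     current_phrase = []
--     for word, pos in lemmatized_text_with_pos:
--         if word in stopwords:
--             if current_phrase:
--                 phrases.append(tuple(current_phrase))
--                 current_phrase = []
--         else:
--             if pos in ['JJ', 'JJR', 'JJS', 'RB', 'RBR', 'RBS']:
--                 if current_phrase and current_phrase[-1][1].startswith('N'):
--                     phrases.append(tuple(current_phrase))
--                     current_phrase = []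
--             elif pos.startswith('N') and current_phrase and not current_phrase[-1][1].startswith('N'):
--                 phrases.append(tuple(current_phrase))
--                 current_phrase = []
--             current_phrase.append((word, pos))
--     if current_phrase:
--         phrases.append(tuple(current_phrase))
--     return phrases
-- ===== SOURCE B (Python) =====
-- _MODIFIER_TAGS = ('JJ', 'JJR', 'JJS', 'RB', 'RBR', 'RBS')
--
--
-- def _cut(prev_pos, pos):
--     # phrase boundary between a token with POS prev_pos and a following token with POS pos
--     if pos in _MODIFIER_TAGS:
--         return prev_pos.startswith('N')
--     return pos.startswith('N') and not prev_pos.startswith('N')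
--
--
-- def _split_segment(seg):
--     pieces = []
--     phrase = [seg[0]]
--     prev = seg[0][1]
--     for tok in seg[1:]:
--         if _cut(prev, tok[1]):
--             pieces.append(tuple(phrase))
--             phrase = []
--         phrase.append(tok)
--         prev = tok[1]
--     pieces.append(tuple(phrase))
--     return pieces
--
--
-- def partition_phrases(lemmatized_text_with_pos, stopwords):
--     # stage 1: maximal stopword-free segments
--     segments = []
--     seg = []
--     for tok in lemmatized_text_with_pos:
--         if tok[0] in stopwords:
--             if seg:
--                 segments.append(seg)
--                 seg = []
--         else:
--             seg.append(tok)
--     if seg: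
--         segments.append(seg)
--     # stage 2: cut each segment at POS boundaries
--     phrases = []
--     for seg in segments:
--         phrases.extend(_split_segment(seg))
--     return phrases
-- ===== Notes on version B (the rewrite author's own statement) =====
-- stated objective: alternative
-- what changed: B replaces A's single stateful loop (one accumulator holding the current phrase, flushed by three interleaved conditions) by a two-stage pipeline: first split the tokens into maximal stopword-free segments, then cut each segment independently at POS boundaries via an explicit prev-POS/cut predicate.
import Mathlib
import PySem

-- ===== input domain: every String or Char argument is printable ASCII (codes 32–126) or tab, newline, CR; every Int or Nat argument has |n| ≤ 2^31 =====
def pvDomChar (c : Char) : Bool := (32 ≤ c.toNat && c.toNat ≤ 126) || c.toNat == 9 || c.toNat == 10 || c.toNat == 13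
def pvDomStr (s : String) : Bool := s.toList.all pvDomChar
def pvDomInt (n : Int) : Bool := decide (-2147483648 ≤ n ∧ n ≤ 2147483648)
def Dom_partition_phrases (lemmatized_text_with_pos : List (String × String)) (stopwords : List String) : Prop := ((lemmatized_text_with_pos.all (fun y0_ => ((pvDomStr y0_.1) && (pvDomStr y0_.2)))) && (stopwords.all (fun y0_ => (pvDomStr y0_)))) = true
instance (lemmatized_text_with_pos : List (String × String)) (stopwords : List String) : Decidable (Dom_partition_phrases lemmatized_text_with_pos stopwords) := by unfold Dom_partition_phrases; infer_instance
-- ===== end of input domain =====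

-- B restructures A's single stateful loop into a two-stage pipeline (stopword-free segments, then POS-boundary cuts per segment); same return value, no speed claim.


-- ===== PORT A =====
def pvADJ : List String := ["JJ", "JJR", "JJS", "RB", "RBR", "RBS"]

def pvIsN (p : String) : Bool := PySem.Str.startswith p "N"

-- current_phrase[-1][1] (only read under 'current_phrase and …', i.e. on nonempty lists)
def pvLastPos (cur : List (String × String)) : String := (cur.getLastD ("", "")).2

def pvStepA (stopwords : List String)
    (st : List (List (String × String)) × List (String × String)) (t : String × String) :
    List (List (String × String)) × List (String × String) :=
  if stopwords.contains t.1 then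
    if st.2.isEmpty then st else (st.1 ++ [st.2], [])
  else
    let st' :=
      if pvADJ.contains t.2 then
        if !st.2.isEmpty && pvIsN (pvLastPos st.2) then (st.1 ++ [st.2], ([] : List (String × String))) else st
      else if pvIsN t.2 && !st.2.isEmpty && !pvIsN (pvLastPos st.2) then (st.1 ++ [st.2], [])
      else st
    (st'.1, st'.2 ++ [t])

def partition_phrases (lemmatized_text_with_pos : List (String × String)) (stopwords : List String) : List (List (String × String)) :=
  let st := lemmatized_text_with_pos.foldl (pvStepA stopwords) ([], [])
  if st.2.isEmpty then st.1 else st.1 ++ [st.2]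

-- ===== PORT B =====
def pvCut (prev pos : String) : Bool :=
  if pvADJ.contains pos then pvIsN prev else pvIsN pos && !pvIsN prev

-- the loop of _split_segment: state (pieces, phrase, prev)
def pvGoCut (pieces : List (List (String × String))) (phrase : List (String × String)) (prev : String) :
    List (String × String) → List (List (String × String))
  | [] => pieces ++ [phrase]
  | t :: rest =>
    if pvCut prev t.2 then pvGoCut (pieces ++ [phrase]) [t] t.2 rest
    else pvGoCut pieces (phrase ++ [t]) t.2 rest

-- _split_segment (only ever called on nonempty segments)
def pvSplitSegment (seg : List (String × String)) : List (List (String × String)) :=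
  match seg with
  | [] => []
  | h :: tl => pvGoCut [] [h] h.2 tl

def pvSegStep (stopwords : List String)
    (st : List (List (String × String)) × List (String × String)) (t : String × String) :
    List (List (String × String)) × List (String × String) :=
  if stopwords.contains t.1 then
    if st.2.isEmpty then st else (st.1 ++ [st.2], [])
  else (st.1, st.2 ++ [t])

def partition_phrases_alt (lemmatized_text_with_pos : List (String × String)) (stopwords : List String) : List (List (String × String)) :=
  let st := lemmatized_text_with_pos.foldl (pvSegStep stopwords) ([], [])
  let segments := if st.2.isEmpty then st.1 else st.1 ++ [st.2]
  segments.foldl (fun phrases seg => phrases ++ pvSplitSegment seg) []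

-- ===== PRECONDITION & SPEC =====
def Spec_partition_phrases (lemmatized_text_with_pos : List (String × String)) (stopwords : List String) (out : List (List (String × String))) : Prop := out = partition_phrases_alt lemmatized_text_with_pos stopwords
instance (lemmatized_text_with_pos : List (String × String)) (stopwords : List String) (out : List (List (String × String))) : Decidable (Spec_partition_phrases lemmatized_text_with_pos stopwords out) := by unfold Spec_partition_phrases; infer_instance

-- ===== CLAIM (what is proved, stated in full; the proofs are below) =====
def Claim_equal_partition_phrases : Prop := ∀ (lemmatized_text_with_pos : List (String × String)) (stopwords : List String), Dom_partition_phrases lemmatized_text_with_pos stopwords → Spec_partition_phrases lemmatized_text_with_pos stopwords (partition_phrases lemmatized_text_with_pos stopwords)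

-- ===== LEMMAS AND PROOFS =====

-- non-accumulator form of A's loop + final flush
def pvFlush (cur : List (String × String)) : List (List (String × String)) :=
  if cur.isEmpty then [] else [cur]

def pvA1 (sw : List String) : List (String × String) → List (String × String) → List (List (String × String))
  | cur, [] => pvFlush cur
  | cur, t :: ts =>
    if sw.contains t.1 then pvFlush cur ++ pvA1 sw [] ts
    else
      if pvADJ.contains t.2 then
        if !cur.isEmpty && pvIsN (pvLastPos cur) then cur :: pvA1 sw [t] ts
        else pvA1 sw (cur ++ [t]) ts
      else if pvIsN t.2 && !cur.isEmpty && !pvIsN (pvLastPos cur) then cur :: pvA1 sw [t] ts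
      else pvA1 sw (cur ++ [t]) ts

-- non-accumulator form of B's segment split
def pvSegR (sw : List String) : List (String × String) → List (String × String) → List (List (String × String))
  | cur, [] => pvFlush cur
  | cur, t :: ts =>
    if sw.contains t.1 then pvFlush cur ++ pvSegR sw [] ts
    else pvSegR sw (cur ++ [t]) ts

-- non-accumulator form of pvGoCut
def pvGoNA (phrase : List (String × String)) (prev : String) :
    List (String × String) → List (List (String × String))
  | [] => [phrase]
  | t :: rest =>
    if pvCut prev t.2 then phrase :: pvGoNA [t] t.2 rest
    else pvGoNA (phrase ++ [t]) t.2 rest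

theorem pvLastPos_concat (l : List (String × String)) (t : String × String) :
    pvLastPos (l ++ [t]) = t.2 := by
  simp [pvLastPos]

theorem pvLastPos_singleton (t : String × String) : pvLastPos [t] = t.2 := by
  simp [pvLastPos]

theorem pvFoldA (sw : List String) :
    ∀ (ts : List (String × String)) (ph : List (List (String × String))) (cur : List (String × String)),
      (if (ts.foldl (pvStepA sw) (ph, cur)).2 = [] then (ts.foldl (pvStepA sw) (ph, cur)).1
        else (ts.foldl (pvStepA sw) (ph, cur)).1 ++ [(ts.foldl (pvStepA sw) (ph, cur)).2])
        = ph ++ pvA1 sw cur ts := by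
  intro ts
  induction ts with
  | nil => intro ph cur; cases cur <;> simp [pvA1, pvFlush]
  | cons t ts ih =>
    intro ph cur
    simp only [List.foldl_cons, pvA1, pvStepA]
    by_cases hs : t.1 ∈ sw
    · by_cases hc : cur = [] <;>
        simp [hs, hc, ih, pvFlush, List.append_assoc]
    · by_cases ha : t.2 ∈ pvADJ <;>
        by_cases hc : cur = [] <;>
        by_cases hn : pvIsN (pvLastPos cur) = true <;>
        by_cases hn1 : pvIsN t.2 = true <;>
        simp [hs, ha, hc, hn, hn1, ih, List.append_assoc]

theorem pvFoldSeg (sw : List String) :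
    ∀ (ts : List (String × String)) (segs : List (List (String × String))) (cur : List (String × String)),
      (if (ts.foldl (pvSegStep sw) (segs, cur)).2 = [] then (ts.foldl (pvSegStep sw) (segs, cur)).1
        else (ts.foldl (pvSegStep sw) (segs, cur)).1 ++ [(ts.foldl (pvSegStep sw) (segs, cur)).2])
        = segs ++ pvSegR sw cur ts := by
  intro ts
  induction ts with
  | nil => intro segs cur; cases cur <;> simp [pvSegR, pvFlush]
  | cons t ts ih =>
    intro segs cur
    simp only [List.foldl_cons, pvSegR, pvSegStep]
    by_cases hs : t.1 ∈ sw
    · by_cases hc : cur = [] <;>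
        simp [hs, hc, ih, pvFlush, List.append_assoc]
    · simp [hs, ih]

theorem pvGoCut_acc :
    ∀ (rest : List (String × String)) (pieces : List (List (String × String)))
      (phrase : List (String × String)) (prev : String),
      pvGoCut pieces phrase prev rest = pieces ++ pvGoNA phrase prev rest := by
  intro rest
  induction rest with
  | nil => intro pieces phrase prev; simp [pvGoCut, pvGoNA]
  | cons t rest ih =>
    intro pieces phrase prev
    simp only [pvGoCut, pvGoNA]
    by_cases h : pvCut prev t.2 = true
    · simp [h, ih, List.append_assoc]
    · simp [h, ih]

theorem pvFoldPhr :
    ∀ (segs : List (List (String × String))) (acc : List (List (String × String))),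
      segs.foldl (fun phrases seg => phrases ++ pvSplitSegment seg) acc
        = acc ++ segs.flatMap pvSplitSegment := by
  intro segs
  induction segs with
  | nil => simp
  | cons s segs ih => intro acc; simp [ih, List.append_assoc]

theorem pvSegR_ne (sw : List String) :
    ∀ (ts cur : List (String × String)), cur ≠ [] →
      pvSegR sw cur ts
        = (cur ++ ts.takeWhile (fun t => !sw.contains t.1))
            :: pvSegR sw [] (ts.dropWhile (fun t => !sw.contains t.1)) := by
  intro ts
  induction ts with
  | nil => intro cur h; simp [pvSegR, pvFlush, h]
  | cons t ts ih =>
    intro cur h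
    simp only [pvSegR, List.takeWhile_cons, List.dropWhile_cons]
    by_cases hs : t.1 ∈ sw
    · simp [hs, pvFlush, h, pvSegR]
    · simp [hs, ih (cur ++ [t]) (by simp)]

-- the central bridge: A's loop equals segment-splitting followed by POS cuts
theorem pvMain (sw : List String) :
    ∀ ts : List (String × String),
      (pvA1 sw [] ts = (pvSegR sw [] ts).flatMap pvSplitSegment) ∧
      (∀ phrase : List (String × String), phrase ≠ [] →
        pvA1 sw phrase ts
          = pvGoNA phrase (pvLastPos phrase) (ts.takeWhile (fun t => !sw.contains t.1))
              ++ (pvSegR sw [] (ts.dropWhile (fun t => !sw.contains t.1))).flatMap pvSplitSegment) := by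
  intro ts
  induction ts with
  | nil =>
    constructor
    · simp [pvA1, pvSegR, pvFlush]
    · intro phrase h
      simp [pvA1, pvSegR, pvGoNA, pvFlush, h]
  | cons t ts ih =>
    have cutEq : ∀ phrase : List (String × String), phrase ≠ [] → ¬ t.1 ∈ sw →
        pvA1 sw phrase (t :: ts)
          = if pvCut (pvLastPos phrase) t.2 = true then phrase :: pvA1 sw [t] ts
            else pvA1 sw (phrase ++ [t]) ts := by
      intro phrase h hs
      simp only [pvA1, pvCut]
      by_cases ha : t.2 ∈ pvADJ <;>
        by_cases hn : pvIsN (pvLastPos phrase) = true <;>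
        by_cases hn1 : pvIsN t.2 = true <;>
        simp [hs, ha, hn, hn1, h]
    constructor
    · -- empty current phrase
      by_cases hs : t.1 ∈ sw
      · simp only [pvA1, pvSegR]
        simpa [hs, pvFlush] using ih.1
      · have h2 := ih.2 [t] (by simp)
        rw [pvLastPos_singleton] at h2
        have hseg := pvSegR_ne sw ts [t] (by simp)
        have hA : pvA1 sw [] (t :: ts) = pvA1 sw [t] ts := by
          simp only [pvA1]
          by_cases ha : t.2 ∈ pvADJ <;> by_cases hn1 : pvIsN t.2 = true <;>
            simp [hs, ha, hn1]
        have hB : pvSegR sw [] (t :: ts) = pvSegR sw [t] ts := by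
          simp [pvSegR, hs]
        rw [hA, hB, h2, hseg]
        simp [pvSplitSegment, pvGoCut_acc]
    · intro phrase h
      by_cases hs : t.1 ∈ sw
      · have hA : pvA1 sw phrase (t :: ts) = pvFlush phrase ++ pvA1 sw [] ts := by
          simp [pvA1, hs]
        rw [hA]
        simp [pvFlush, h, hs, pvGoNA, pvSegR, ih.1]
      · rw [cutEq phrase h hs]
        by_cases hcut : pvCut (pvLastPos phrase) t.2 = true
        · have h2 := ih.2 [t] (by simp)
          rw [pvLastPos_singleton] at h2
          simp [hcut, h2, hs, pvGoNA]
        · have h2 := ih.2 (phrase ++ [t]) (by simp)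
          rw [pvLastPos_concat] at h2
          simp [hcut, h2, hs, pvGoNA]

-- ===== VERDICT (by name: the statement is the Claim_ definition above) =====
theorem partition_phrases_spec : Claim_equal_partition_phrases := by
  intro toks sw _
  unfold Spec_partition_phrases partition_phrases partition_phrases_alt
  have hA := pvFoldA sw toks [] []
  have hS := pvFoldSeg sw toks [] []
  simp only [List.isEmpty_iff]
  rw [hA, hS, pvFoldPhr]
  simpa using (pvMain sw toks).1
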